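-- pv_equiv track=rewrite | github.com/Landcruiser87/Capstone_Project | analysis/zg_layer_generator_01.py | Invalid_BidirectionalGRU
-- ===== SOURCE A (Python) =====
-- def Invalid_BidirectionalGRU(model):
-- 	bgru_indices = [i for i,d in enumerate(model) if d == 'BidirectionalGRU']
--
-- 	if len(bgru_indices) > 0:
-- 		#No dense before bgru
-- 		dense_indices = [i for i,d in enumerate(model) if d == 'Dense']
-- 		for bgi in bgru_indices:
-- 			if len([di for di in dense_indices if di < bgi]) > 0:
-- 				return True
--
-- 		#No flatten before BGRU
-- 		flatten_indices = [i for i,d in enumerate(model) if d == 'Flatten']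
-- 		for bgi in bgru_indices:
-- 			if len([fi for fi in flatten_indices if fi < bgi]) > 0:
-- 				return True
--
-- 		#No CNN types before BidirectionalGRU
-- 		conv1d_indices = [i for i,d in enumerate(model) if d == 'Conv1D']
-- 		for bgi in bgru_indices:
-- 			if len([fi for fi in conv1d_indices if fi < bgi]) > 0:
-- 				return True
-- 		convlstm_indices = [i for i,d in enumerate(model) if d == 'ConvLSTM2D']
-- 		for bgi in bgru_indices:
-- 			if len([fi for fi in convlstm_indices if fi < bgi]) > 0:
-- 				return True
--
-- 		#CNN before it			 NO
-- 		#ConvLSTM before it?	   NO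
-- 		#maxpooling1d before it	TRUE
-- 		#Bidir before it		   TRUE
--
-- 	return False
-- ===== SOURCE B (Python) =====
-- def Invalid_BidirectionalGRU(model):
-- 	forbidden = ('Dense', 'Flatten', 'Conv1D', 'ConvLSTM2D')
-- 	seen_forbidden = False
-- 	for d in model:
-- 		if d == 'BidirectionalGRU' and seen_forbidden:
-- 			return True
-- 		if d in forbidden:
-- 			seen_forbidden = True
-- 	return False
-- ===== Notes on version B (the rewrite author's own statement) =====
-- stated objective: simpler
-- what changed: Replaced the four enumerate-and-filter passes plus nested per-BGRU scans by a single left-to-right pass that tracks whether any forbidden layer has been seen and returns True at the first BidirectionalGRU after one.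
import Mathlib
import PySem

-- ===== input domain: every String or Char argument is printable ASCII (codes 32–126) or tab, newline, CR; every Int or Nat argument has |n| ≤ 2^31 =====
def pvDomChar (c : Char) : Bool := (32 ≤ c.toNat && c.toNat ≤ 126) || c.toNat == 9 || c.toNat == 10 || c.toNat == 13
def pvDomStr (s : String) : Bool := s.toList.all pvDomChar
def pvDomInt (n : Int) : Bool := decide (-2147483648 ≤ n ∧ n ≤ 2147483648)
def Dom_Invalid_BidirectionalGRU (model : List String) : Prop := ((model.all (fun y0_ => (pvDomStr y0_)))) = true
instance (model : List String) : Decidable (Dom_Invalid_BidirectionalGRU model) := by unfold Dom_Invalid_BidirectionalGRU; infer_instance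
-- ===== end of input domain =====

-- B replaces A's four enumerate-and-filter passes with one left-to-right pass
-- tracking whether a forbidden layer was seen (objective: simpler).


-- ===== PORT A =====
-- [i for i,d in enumerate(model) if d == s]
def pvIdx (model : List String) (s : String) : List Int :=
  (PySem.List.enumerate model).filterMap (fun p => if p.2 = s then some p.1 else none)

-- "for bgi in bgru_indices: if len([di for di in dis if di < bgi]) > 0: return True"
def pvCheck (bgru dis : List Int) : Bool :=
  bgru.any (fun bgi => (dis.filter (fun di => decide (di < bgi))).length > 0)

def Invalid_BidirectionalGRU (model : List String) : Bool :=
  let bgru_indices := pvIdx model "BidirectionalGRU"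
  if bgru_indices.length > 0 then
    if pvCheck bgru_indices (pvIdx model "Dense") then true
    else if pvCheck bgru_indices (pvIdx model "Flatten") then true
    else if pvCheck bgru_indices (pvIdx model "Conv1D") then true
    else if pvCheck bgru_indices (pvIdx model "ConvLSTM2D") then true
    else false
  else false

-- ===== PORT B =====
def pvForbidden (d : String) : Bool :=
  d = "Dense" || d = "Flatten" || d = "Conv1D" || d = "ConvLSTM2D"

def pvAltGo (seen : Bool) : List String → Bool
  | [] => false
  | d :: rest =>
      if d = "BidirectionalGRU" && seen then true
      else pvAltGo (seen || pvForbidden d) rest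

def Invalid_BidirectionalGRU_alt (model : List String) : Bool :=
  pvAltGo false model

-- ===== PRECONDITION & SPEC =====
def Spec_Invalid_BidirectionalGRU (model : List String) (out : Bool) : Prop := out = Invalid_BidirectionalGRU_alt model
instance (model : List String) (out : Bool) : Decidable (Spec_Invalid_BidirectionalGRU model out) := by unfold Spec_Invalid_BidirectionalGRU; infer_instance

-- ===== CLAIM (what is proved, stated in full; the proofs are below) =====
def Claim_equal_Invalid_BidirectionalGRU : Prop := ∀ (model : List String), Dom_Invalid_BidirectionalGRU model → Spec_Invalid_BidirectionalGRU model (Invalid_BidirectionalGRU model)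

-- ===== LEMMAS AND PROOFS =====

-- membership in an index list
theorem mem_pvIdx {model : List String} {s : String} {k : Int} :
    k ∈ pvIdx model s ↔ ∃ (n : Nat) (h : n < model.length), k = (n : Int) ∧ model[n] = s := by
  unfold pvIdx
  simp only [List.mem_filterMap, PySem.List.mem_enumerate_iff]
  constructor
  · rintro ⟨⟨i, d⟩, ⟨n, h, hp⟩, hif⟩
    obtain ⟨rfl, rfl⟩ := Prod.mk.injEq .. ▸ hp
    simp only [] at hif
    split at hif
    · exact ⟨n, h, by simpa using hif.symm, by simpa using ‹_›⟩
    · exact absurd hif (by simp)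
  · rintro ⟨n, h, rfl, hs⟩
    exact ⟨((n : Int), model[n]), ⟨n, h, by simp⟩, by simp [hs]⟩

-- the index-pair characterisation of A
def PairProp (model : List String) : Prop :=
  ∃ (m : Nat) (hm : m < model.length), model[m] = "BidirectionalGRU" ∧
    ∃ (n : Nat) (hn : n < model.length), n < m ∧ pvForbidden model[n] = true

theorem A_iff {model : List String} :
    Invalid_BidirectionalGRU model = true ↔ PairProp model := by
  unfold Invalid_BidirectionalGRU PairProp
  have hchk : ∀ s : String, pvCheck (pvIdx model "BidirectionalGRU") (pvIdx model s) = true ↔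
      ∃ (m : Nat) (hm : m < model.length), model[m] = "BidirectionalGRU" ∧
        ∃ (n : Nat) (hn : n < model.length), n < m ∧ model[n] = s := by
    intro s
    unfold pvCheck
    simp only [List.any_eq_true, List.length_pos_iff_exists_mem,
      List.mem_filter, mem_pvIdx, decide_eq_true_eq]
    constructor
    · rintro ⟨bgi, ⟨m, hm, rfl, hbg⟩, di, ⟨⟨n, hn, rfl, hs⟩, hlt⟩⟩
      exact ⟨m, hm, hbg, n, hn, by exact_mod_cast hlt, hs⟩
    · rintro ⟨m, hm, hbg, n, hn, hlt, hs⟩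
      exact ⟨(m : Int), ⟨m, hm, rfl, hbg⟩, (n : Int), ⟨n, hn, rfl, hs⟩, by exact_mod_cast hlt⟩
  simp only []
  split_ifs with h0 h1 h2 h3 h4
  · simp only [true_iff]
    obtain ⟨m, hm, hbg, n, hn, hlt, hs⟩ := (hchk _).mp h1
    exact ⟨m, hm, hbg, n, hn, hlt, by simp [pvForbidden, hs]⟩
  · simp only [true_iff]
    obtain ⟨m, hm, hbg, n, hn, hlt, hs⟩ := (hchk _).mp h2
    exact ⟨m, hm, hbg, n, hn, hlt, by simp [pvForbidden, hs]⟩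
  · simp only [true_iff]
    obtain ⟨m, hm, hbg, n, hn, hlt, hs⟩ := (hchk _).mp h3
    exact ⟨m, hm, hbg, n, hn, hlt, by simp [pvForbidden, hs]⟩
  · simp only [true_iff]
    obtain ⟨m, hm, hbg, n, hn, hlt, hs⟩ := (hchk _).mp h4
    exact ⟨m, hm, hbg, n, hn, hlt, by simp [pvForbidden, hs]⟩
  · simp only [false_iff]
    rintro ⟨m, hm, hbg, n, hn, hlt, hf⟩
    have : ∃ s, model[n] = s ∧ (s = "Dense" ∨ s = "Flatten" ∨ s = "Conv1D" ∨ s = "ConvLSTM2D") := by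
      simp only [pvForbidden, Bool.or_eq_true, decide_eq_true_eq] at hf
      exact ⟨model[n], rfl, by tauto⟩
    obtain ⟨s, hs, hcases⟩ := this
    rcases hcases with rfl | rfl | rfl | rfl
    · exact h1 ((hchk _).mpr ⟨m, hm, hbg, n, hn, hlt, hs⟩)
    · exact h2 ((hchk _).mpr ⟨m, hm, hbg, n, hn, hlt, hs⟩)
    · exact h3 ((hchk _).mpr ⟨m, hm, hbg, n, hn, hlt, hs⟩)
    · exact h4 ((hchk _).mpr ⟨m, hm, hbg, n, hn, hlt, hs⟩)
  · simp only [false_iff]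
    rintro ⟨m, hm, hbg, _⟩
    apply h0
    simp only [List.length_pos_iff_exists_mem]
    exact ⟨(m : Int), mem_pvIdx.mpr ⟨m, hm, rfl, hbg⟩⟩

-- the characterisation of B's loop, with the seen flag generalised
theorem altGo_iff (model : List String) : ∀ seen : Bool,
    pvAltGo seen model = true ↔
      (seen = true ∧ "BidirectionalGRU" ∈ model) ∨ PairProp model := by
  induction model with
  | nil => intro seen; simp [pvAltGo, PairProp]
  | cons d rest ih =>
    intro seen
    have hPair : PairProp (d :: rest) ↔
        (pvForbidden d = true ∧ "BidirectionalGRU" ∈ rest) ∨ PairProp rest := by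
      unfold PairProp
      constructor
      · rintro ⟨m, hm, hbg, n, hn, hlt, hf⟩
        cases n with
        | zero =>
          cases m with
          | zero => omega
          | succ m =>
            left
            refine ⟨by simpa using hf, ?_⟩
            have hm' : m < rest.length := by simpa using hm
            have hbg' : rest[m] = "BidirectionalGRU" := by simpa using hbg
            exact hbg' ▸ List.getElem_mem _
        | succ n =>
          cases m with
          | zero => omega
          | succ m =>
            right
            exact ⟨m, by simpa using hm, by simpa using hbg, n, by simpa using hn,
              by omega, by simpa using hf⟩
      · rintro (⟨hf, hmem⟩ | ⟨m, hm, hbg, n, hn, hlt, hff⟩)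
        · obtain ⟨m, hm, hbg⟩ := List.mem_iff_getElem.mp hmem
          exact ⟨m + 1, by simpa using hm, by simpa using hbg, 0, by simp, by omega,
            by simpa using hf⟩
        · exact ⟨m + 1, by simpa using hm, by simpa using hbg, n + 1, by simpa using hn,
            by omega, by simpa using hff⟩
    simp only [pvAltGo]
    split_ifs with h
    · simp only [Bool.and_eq_true, decide_eq_true_eq] at h
      simp [h.1, h.2]
    · rw [ih (seen || pvForbidden d), hPair]
      simp only [Bool.or_eq_true]
      constructor
      · rintro (⟨hs | hf, hmem⟩ | hp)
        · exact Or.inl ⟨hs, List.mem_cons_of_mem _ hmem⟩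
        · right; left; exact ⟨hf, hmem⟩
        · right; right; exact hp
      · rintro (⟨hs, hmem⟩ | ⟨hf, hmem⟩ | hp)
        · rcases List.mem_cons.mp hmem with rfl | hmem'
          · exact absurd (by simp [hs]) h
          · exact Or.inl ⟨Or.inl hs, hmem'⟩
        · exact Or.inl ⟨Or.inr hf, hmem⟩
        · exact Or.inr hp

theorem B_iff {model : List String} :
    Invalid_BidirectionalGRU_alt model = true ↔ PairProp model := by
  unfold Invalid_BidirectionalGRU_alt
  rw [altGo_iff model false]
  simp

-- ===== VERDICT (by name: the statement is the Claim_ definition above) =====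
theorem Invalid_BidirectionalGRU_spec : Claim_equal_Invalid_BidirectionalGRU := by
  intro model _
  unfold Spec_Invalid_BidirectionalGRU
  rcases h : Invalid_BidirectionalGRU_alt model with _ | _
  · rcases ha : Invalid_BidirectionalGRU model with _ | _
    · rfl
    · exact absurd (B_iff.mpr (A_iff.mp ha)) (by simp [h])
  · exact (A_iff.mpr (B_iff.mp h))
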